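-- pv_equiv track=rewrite | github.com/0055kms/Algorithm | 프로그래머스/2/42586. 기능개발/기능개발.py | solution
-- ===== SOURCE A (Python) =====
-- def solution(progresses, speeds):
--     answer = []
--     can = [0] * len(speeds)
--     for i in range(len(speeds)):
--         p = 100-progresses[i] #7 70 45
--         s = speeds[i]
--         if p % s == 0: can[i] = (p//s)
--         else: can[i] = (p//s+1)
--     can = can[::-1]
--     while can:
--         tmp = 1
--         first = can.pop()
--         while can and can[-1] <= first:
--             can.pop()
--             tmp += 1
--         answer.append(tmp)
--     return answer
-- ===== SOURCE B (Python) =====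
-- def solution(progresses, speeds):
--     days = [(100 - p) // s if (100 - p) % s == 0 else (100 - p) // s + 1
--             for p, s in zip(progresses, speeds)]
--     answer = []
--     cnt = 0
--     lead = 0
--     for d in days:
--         if cnt and d <= lead:
--             cnt += 1
--         else:
--             if cnt:
--                 answer.append(cnt)
--             lead, cnt = d, 1
--     if cnt:
--         answer.append(cnt)
--     return answer
-- ===== Notes on version B (the rewrite author's own statement) =====
-- stated objective: simpler
-- what changed: Replaces A's reverse-the-list-and-pop nested while loops with a single forward pass that keeps the current group's leader and count, flushing the count when a feature's day exceeds the leader.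
import Mathlib
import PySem

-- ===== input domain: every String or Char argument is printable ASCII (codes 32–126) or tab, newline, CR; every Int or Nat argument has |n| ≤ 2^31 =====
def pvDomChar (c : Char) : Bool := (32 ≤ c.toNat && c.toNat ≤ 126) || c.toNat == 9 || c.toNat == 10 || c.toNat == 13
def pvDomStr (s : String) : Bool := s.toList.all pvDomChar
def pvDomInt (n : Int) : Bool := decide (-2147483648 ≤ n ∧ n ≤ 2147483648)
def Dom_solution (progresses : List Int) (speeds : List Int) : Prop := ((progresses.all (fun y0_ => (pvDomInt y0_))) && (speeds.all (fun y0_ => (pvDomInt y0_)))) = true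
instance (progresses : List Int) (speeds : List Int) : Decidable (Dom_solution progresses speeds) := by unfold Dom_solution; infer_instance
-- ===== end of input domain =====

-- B replaces A's reverse-and-pop stack grouping by one forward pass with a group leader and counter (objective: simpler).

-- ===== PORT A =====
-- inner 'while can and can[-1] <= first: can.pop(); tmp += 1' (pop from the end of `can`)
def popRunA (first : Int) (can : List Int) (tmp : Int) : List Int × Int :=
  match h : can.getLast? with
  | some x => if x ≤ first then popRunA first can.dropLast (tmp + 1) else (can, tmp)
  | none => (can, tmp)
termination_by can.length
decreasing_by
  cases can with
  | nil => simp at h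
  | cons a l => simp [List.length_dropLast]

theorem popRunA_length_le (first : Int) (can : List Int) (tmp : Int) :
    (popRunA first can tmp).1.length ≤ can.length := by
  fun_induction popRunA with
  | case1 can tmp x h hle ih =>
      exact le_trans ih (by simp [List.length_dropLast])
  | case2 => simp
  | case3 => simp

-- outer 'while can: first = can.pop(); …; answer.append(tmp)'
def whileA (can : List Int) (answer : List Int) : List Int :=
  match h : can.getLast? with
  | none => answer
  | some first =>
      let r := popRunA first can.dropLast 1
      whileA r.1 (answer ++ [r.2])
termination_by can.length
decreasing_by
  cases can with
  | nil => simp at h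
  | cons a l =>
      calc (popRunA first (a :: l).dropLast 1).1.length
          ≤ (a :: l).dropLast.length := popRunA_length_le _ _ _
        _ < (a :: l).length := by simp [List.length_dropLast]

def solution (progresses : List Int) (speeds : List Int) : List Int :=
  -- can = [0]*len(speeds); for i in range(len(speeds)): can[i] = … (indices are in range under Pre_)
  let can := (PySem.List.pyRange 0 (speeds.length : Int) 1).foldl
    (fun can i =>
      let p := 100 - PySem.List.pyGetD progresses i 0
      let s := PySem.List.pyGetD speeds i 0
      if PySem.Int.mod p s = 0 then can.set i.toNat (PySem.Int.floordiv p s)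
      else can.set i.toNat (PySem.Int.floordiv p s + 1))
    (List.replicate speeds.length 0)
  whileA can.reverse []

-- ===== PORT B =====
def solution_alt (progresses : List Int) (speeds : List Int) : List Int :=
  let days := (progresses.zip speeds).map (fun ps =>
    if PySem.Int.mod (100 - ps.1) ps.2 = 0 then PySem.Int.floordiv (100 - ps.1) ps.2
    else PySem.Int.floordiv (100 - ps.1) ps.2 + 1)
  let st := days.foldl
    (fun (st : List Int × Int × Int) d =>
      if st.2.1 ≠ 0 ∧ d ≤ st.2.2 then (st.1, st.2.1 + 1, st.2.2)
      else ((if st.2.1 ≠ 0 then st.1 ++ [st.2.1] else st.1), 1, d))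
    ([], 0, 0)
  if st.2.1 ≠ 0 then st.1 ++ [st.2.1] else st.1

-- ===== PRECONDITION & SPEC =====
-- Pre_ excludes exactly the inputs where Python A raises: a zero speed (ZeroDivisionError)
-- or fewer progresses than speeds (IndexError in progresses[i]).
def Pre_solution (progresses : List Int) (speeds : List Int) : Prop :=
  speeds.length ≤ progresses.length ∧ ∀ s ∈ speeds, s ≠ 0
instance (progresses : List Int) (speeds : List Int) : Decidable (Pre_solution progresses speeds) := by
  unfold Pre_solution; infer_instance
def pvWitness_solution : List Int × List Int := ([93, 30, 55], [1, 30, 5])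

def Spec_solution (progresses : List Int) (speeds : List Int) (out : List Int) : Prop := out = solution_alt progresses speeds
instance (progresses : List Int) (speeds : List Int) (out : List Int) : Decidable (Spec_solution progresses speeds out) := by unfold Spec_solution; infer_instance

-- ===== CLAIM (what is proved, stated in full; the proofs are below) =====
def Claim_equal_solution : Prop := ∀ (progresses : List Int) (speeds : List Int), Dom_solution progresses speeds → Pre_solution progresses speeds → Spec_solution progresses speeds (solution progresses speeds)

-- ===== LEMMAS AND PROOFS =====

-- the common per-feature deploy-day formula
def pvDay (p s : Int) : Int :=
  if PySem.Int.mod (100 - p) s = 0 then PySem.Int.floordiv (100 - p) s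
  else PySem.Int.floordiv (100 - p) s + 1

-- reference grouping: count the leader plus the following run of days ≤ leader
def pvGroups : List Int → List Int
  | [] => []
  | d :: rest =>
      (1 + ((rest.takeWhile (fun x => x ≤ d)).length : Int)) :: pvGroups (rest.dropWhile (fun x => x ≤ d))
termination_by l => l.length
decreasing_by
  have := List.length_dropWhile_le (fun x => x ≤ d) rest
  simp; omega

theorem popRunA_reverse (first : Int) (l : List Int) (tmp : Int) :
    popRunA first l.reverse tmp
      = ((l.dropWhile (fun x => x ≤ first)).reverse,
         tmp + ((l.takeWhile (fun x => x ≤ first)).length : Int)) := by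
  induction l generalizing tmp with
  | nil => rw [popRunA]; simp
  | cons x xs ih =>
      rw [popRunA]
      have hconc : (x :: xs).reverse = xs.reverse ++ [x] := by simp
      rw [hconc]
      split
      case h_1 y heq =>
        rw [List.getLast?_concat] at heq
        cases heq
        rw [List.dropLast_concat]
        by_cases hx : x ≤ first
        · rw [if_pos hx, ih]
          simp only [List.takeWhile_cons, List.dropWhile_cons, hx, decide_true, if_true]
          refine congrArg _ ?_
          simp only [List.length_cons]
          push_cast; ring
        · rw [if_neg hx]
          simp [hx]
      case h_2 heq => simp at heq

theorem whileA_reverse (ds ans : List Int) :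
    whileA ds.reverse ans = ans ++ pvGroups ds := by
  induction ds using pvGroups.induct generalizing ans with
  | case1 => rw [whileA]; simp [pvGroups]
  | case2 d rest ih =>
      rw [whileA]
      have hconc : (d :: rest).reverse = rest.reverse ++ [d] := by simp
      rw [hconc]
      split
      case h_2 y heq =>
        rw [List.getLast?_concat] at heq
        cases heq
        rw [List.dropLast_concat, popRunA_reverse, ih, pvGroups]
        simp
      case h_1 heq => simp at heq

def pvStep (st : List Int × Int × Int) (d : Int) : List Int × Int × Int :=
  if st.2.1 ≠ 0 ∧ d ≤ st.2.2 then (st.1, st.2.1 + 1, st.2.2)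
  else ((if st.2.1 ≠ 0 then st.1 ++ [st.2.1] else st.1), 1, d)

def pvFinish (st : List Int × Int × Int) : List Int :=
  if st.2.1 ≠ 0 then st.1 ++ [st.2.1] else st.1

theorem pvGroups_nil : pvGroups [] = [] := by rw [pvGroups]

theorem pvGroups_cons (d : Int) (rest : List Int) :
    pvGroups (d :: rest)
      = (1 + ((rest.takeWhile (fun x => x ≤ d)).length : Int))
        :: pvGroups (rest.dropWhile (fun x => x ≤ d)) := by rw [pvGroups]

-- B's fold with an open group (cnt ≥ 1) flushes at a new leader or at the end
theorem foldB_open (ds : List Int) (ans : List Int) (cnt lead : Int) (hc : 1 ≤ cnt) :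
    pvFinish (ds.foldl pvStep (ans, cnt, lead))
      = ans ++ (cnt + ((ds.takeWhile (fun x => x ≤ lead)).length : Int))
              :: pvGroups (ds.dropWhile (fun x => x ≤ lead)) := by
  induction ds generalizing ans cnt lead with
  | nil =>
      simp only [List.foldl_nil, List.takeWhile_nil, List.dropWhile_nil, pvGroups_nil, pvFinish]
      rw [if_pos (by omega : cnt ≠ 0)]
      simp
  | cons d rest ih =>
      simp only [List.foldl_cons, pvStep]
      by_cases hd : d ≤ lead
      · rw [if_pos ⟨by omega, hd⟩, ih _ _ _ (by omega)]
        simp only [List.takeWhile_cons, List.dropWhile_cons, hd, decide_true, if_true,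
          List.length_cons]
        push_cast; ring_nf
      · rw [if_neg (by simp [hd]), if_pos (by omega : cnt ≠ 0), ih _ _ _ (by omega : (1:Int) ≤ 1)]
        simp [hd, pvGroups_cons]

theorem solution_alt_eq_groups (progresses speeds : List Int) :
    solution_alt progresses speeds = pvGroups ((progresses.zip speeds).map (fun ps => pvDay ps.1 ps.2)) := by
  have hB : solution_alt progresses speeds
      = pvFinish (((progresses.zip speeds).map (fun ps => pvDay ps.1 ps.2)).foldl pvStep ([], 0, 0)) := rfl
  rw [hB]
  generalize (progresses.zip speeds).map (fun ps => pvDay ps.1 ps.2) = ds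
  cases ds with
  | nil => simp [pvGroups_nil, pvFinish]
  | cons d rest =>
      simp only [List.foldl_cons]
      have h0 : pvStep ([], 0, d) d = ([], 1, d) := by simp [pvStep]
      have h0' : pvStep (([] : List Int), (0 : Int), (0 : Int)) d = ([], 1, d) := by simp [pvStep]
      rw [h0', foldB_open rest [] 1 d (by omega), pvGroups_cons]
      simp

-- A's index loop writing can[i] builds exactly the days list
theorem canFold_take (progresses speeds : List Int) (hlen : speeds.length ≤ progresses.length)
    (k : Nat) (hk : k ≤ speeds.length) (acc : List Int) (hacc : acc.length = speeds.length) :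
    (PySem.List.pyRange 0 (k : Int) 1).foldl
      (fun can i =>
        let p := 100 - PySem.List.pyGetD progresses i 0
        let s := PySem.List.pyGetD speeds i 0
        if PySem.Int.mod p s = 0 then can.set i.toNat (PySem.Int.floordiv p s)
        else can.set i.toNat (PySem.Int.floordiv p s + 1))
      acc
    = ((progresses.zip speeds).map (fun ps => pvDay ps.1 ps.2)).take k ++ acc.drop k := by
  induction k with
  | zero => simp
  | succ k ih =>
      have hk' : k ≤ speeds.length := by omega
      have hkp : k < progresses.length := by omega
      have hks : k < speeds.length := by omega
      have hzl : ((progresses.zip speeds).map (fun ps => pvDay ps.1 ps.2)).length = speeds.length := by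
        simp [List.length_zip]; omega
      have hsplit : PySem.List.pyRange 0 ((k : Int) + 1) 1
          = PySem.List.pyRange 0 (k : Int) 1 ++ [(k : Int)] := by
        exact PySem.List.pyRange_one_succ_right (by positivity)
      rw [(by push_cast; rfl : ((k + 1 : Nat) : Int) = (k : Int) + 1), hsplit,
        List.foldl_append, ih hk']
      simp only [List.foldl_cons, List.foldl_nil]
      have hgp : PySem.List.pyGetD progresses (k : Int) 0 = progresses[k] :=
        PySem.List.pyGetD_natCast progresses k 0 |>.trans (by rw [List.getD_eq_getElem _ _ hkp])
      have hgs : PySem.List.pyGetD speeds (k : Int) 0 = speeds[k] :=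
        PySem.List.pyGetD_natCast speeds k 0 |>.trans (by rw [List.getD_eq_getElem _ _ hks])
      have htn : ((k : Int)).toNat = k := by simp
      have hset : ∀ v : Int,
          (((progresses.zip speeds).map (fun ps => pvDay ps.1 ps.2)).take k ++ acc.drop k).set k v
          = ((progresses.zip speeds).map (fun ps => pvDay ps.1 ps.2)).take k ++ v :: acc.drop (k + 1) := by
        intro v
        have hlen_take : (((progresses.zip speeds).map (fun ps => pvDay ps.1 ps.2)).take k).length = k := by
          simp [hzl]; omega
        rw [List.set_append]
        rw [if_neg (by omega)]
        have hdropc : acc.drop k = acc[k] :: acc.drop (k + 1) := by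
          rw [List.drop_eq_getElem_cons (by omega)]
        rw [hlen_take, Nat.sub_self, hdropc, List.set_cons_zero]
      have htake : ((progresses.zip speeds).map (fun ps => pvDay ps.1 ps.2)).take (k + 1)
          = ((progresses.zip speeds).map (fun ps => pvDay ps.1 ps.2)).take k ++ [pvDay progresses[k] speeds[k]] := by
        rw [List.take_add_one]
        have : ((progresses.zip speeds).map (fun ps => pvDay ps.1 ps.2))[k]? = some (pvDay progresses[k] speeds[k]) := by
          rw [List.getElem?_eq_getElem (by omega)]
          simp [List.getElem_zip]
        simp [this]
      simp only [hgp, hgs, htn]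
      by_cases hmod : PySem.Int.mod (100 - progresses[k]) speeds[k] = 0
      · rw [if_pos hmod, hset, htake]
        simp [pvDay, hmod]
      · rw [if_neg hmod, hset, htake]
        simp [pvDay, hmod]

theorem solution_eq_groups (progresses speeds : List Int)
    (hlen : speeds.length ≤ progresses.length) :
    solution progresses speeds = pvGroups ((progresses.zip speeds).map (fun ps => pvDay ps.1 ps.2)) := by
  unfold solution
  have hcan := canFold_take progresses speeds hlen speeds.length (le_refl _)
    (List.replicate speeds.length 0) (by simp)
  have hzl : ((progresses.zip speeds).map (fun ps => pvDay ps.1 ps.2)).length = speeds.length := by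
    simp [List.length_zip]; omega
  simp only at hcan
  rw [hcan]
  rw [List.take_of_length_le (by omega), List.drop_of_length_le (by simp), List.append_nil]
  exact whileA_reverse _ []

-- ===== VERDICT (by name: the statement is the Claim_ definition above) =====
theorem solution_spec : Claim_equal_solution := by
  intro progresses speeds _ hpre
  unfold Spec_solution
  rw [solution_eq_groups progresses speeds hpre.1, solution_alt_eq_groups]
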